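-- pv_equiv track=rewrite | github.com/mavinomichael/AgentGym-RL | AgentGym-RL/verl/improve_multi_agent/protocol.py | _match_action_hint_to_index
-- ===== SOURCE A (Python) =====
-- from typing import Any, Dict, Iterable, List, Optional, Sequence
--
-- def _action_matches_target(action: str, target: Dict[str, str]) -> bool:
--     normalized = action.lower()
--     object_type = target.get("object_type", "none")
--     color = target.get("color", "none")
--     if object_type != "none" and object_type not in normalized:
--         return False
--     if color != "none" and color not in normalized:
--         return False
--     return True
--
-- def _match_action_hint_to_index(
--     action_hint: str,
--     legal_actions: Sequence[str],
--     target: Optional[Dict[str, str]] = None,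
-- ) -> Optional[int]:
--     target = target or {"object_type": "none", "color": "none", "location_hint": "unknown"}
--     normalized_actions = [action.lower().strip() for action in legal_actions]
--
--     def choose(predicate) -> Optional[int]:
--         for idx, action in enumerate(normalized_actions):
--             if predicate(action):
--                 return idx
--         return None
--
--     preferred_matches = {
--         "turn_left": lambda action: action == "turn left",
--         "turn_right": lambda action: action == "turn right",
--         "move_forward": lambda action: action == "move forward",
--         "pickup": lambda action: ("pick up" in action or action.startswith("pickup ")) and _action_matches_target(action, target),
--         "toggle": lambda action: "toggle" in action and _action_matches_target(action, target),
--         "drop": lambda action: action == "drop",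
--         "done": lambda action: action == "check available actions",
--     }
--     if action_hint in preferred_matches:
--         match = choose(preferred_matches[action_hint])
--         if match is not None:
--             return match
--
--     if action_hint in {"move_forward", "pickup", "toggle"}:
--         targeted_go_to = choose(
--             lambda action: action.startswith("go to ") and _action_matches_target(action, target)
--         )
--         if targeted_go_to is not None:
--             return targeted_go_to
--
--     if target.get("object_type", "none") != "none":
--         targeted_any = choose(lambda action: _action_matches_target(action, target))
--         if targeted_any is not None:
--             return targeted_any
--
--     safe_default = choose(lambda action: action != "check available actions")
--     if safe_default is not None:
--         return safe_default
--     return 0 if legal_actions else None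
-- ===== SOURCE B (Python) =====
-- def _match_action_hint_to_index(action_hint, legal_actions, target=None):
--     """Single-pass tier scan: each legal action gets the lowest priority tier it
--     qualifies for; return the earliest index achieving the smallest tier."""
--     target = target or {"object_type": "none", "color": "none", "location_hint": "unknown"}
--     object_type = target.get("object_type", "none")
--     color = target.get("color", "none")
--
--     def matches(action):
--         n = action.lower()
--         return (object_type == "none" or object_type in n) and (color == "none" or color in n)
--
--     def preferred(action):
--         if action_hint == "turn_left":
--             return action == "turn left"
--         if action_hint == "turn_right":
--             return action == "turn right"
--         if action_hint == "move_forward":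
--             return action == "move forward"
--         if action_hint == "pickup":
--             return ("pick up" in action or action.startswith("pickup ")) and matches(action)
--         if action_hint == "toggle":
--             return "toggle" in action and matches(action)
--         if action_hint == "drop":
--             return action == "drop"
--         if action_hint == "done":
--             return action == "check available actions"
--         return False
--
--     hinted = action_hint in ("turn_left", "turn_right", "move_forward", "pickup", "toggle", "drop", "done")
--     go_gate = action_hint in ("move_forward", "pickup", "toggle")
--
--     def tier(action):
--         if hinted and preferred(action):
--             return 0
--         if go_gate and action.startswith("go to ") and matches(action):
--             return 1
--         if object_type != "none" and matches(action):
--             return 2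
--         if action != "check available actions":
--             return 3
--         return None
--
--     best = None  # (tier, index), strictly improving tier only -> earliest index wins
--     for idx, raw in enumerate(legal_actions):
--         t = tier(raw.lower().strip())
--         if t is not None and (best is None or t < best[0]):
--             best = (t, idx)
--     if best is not None:
--         return best[1]
--     return 0 if legal_actions else None
-- ===== Notes on version B (the rewrite author's own statement) =====
-- stated objective: alternative
-- what changed: A's up-to-four sequential first-match scans over the action list are replaced by a single pass that assigns each action the lowest gated priority tier (0 = exact preferred match, 1 = targeted 'go to', 2 = any target match, 3 = not 'check available actions') and keeps the earliest index of the smallest tier.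
import Mathlib
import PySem

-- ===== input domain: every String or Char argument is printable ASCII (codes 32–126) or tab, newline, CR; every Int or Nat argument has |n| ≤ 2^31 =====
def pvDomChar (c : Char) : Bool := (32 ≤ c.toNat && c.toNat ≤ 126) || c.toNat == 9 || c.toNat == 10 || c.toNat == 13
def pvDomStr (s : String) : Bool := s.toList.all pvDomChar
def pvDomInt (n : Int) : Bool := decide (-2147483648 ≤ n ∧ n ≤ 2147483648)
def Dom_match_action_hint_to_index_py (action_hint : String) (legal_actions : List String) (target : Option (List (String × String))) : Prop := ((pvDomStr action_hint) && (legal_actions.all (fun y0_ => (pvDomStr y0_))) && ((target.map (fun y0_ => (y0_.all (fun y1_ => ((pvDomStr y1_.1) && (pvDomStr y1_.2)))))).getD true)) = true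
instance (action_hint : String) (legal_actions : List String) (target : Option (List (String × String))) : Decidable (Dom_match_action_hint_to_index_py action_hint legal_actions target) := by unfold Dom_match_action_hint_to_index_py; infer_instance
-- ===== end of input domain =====

-- B replaces A's up-to-four sequential `choose` scans by ONE pass that assigns each
-- action its lowest qualifying priority tier and keeps the earliest index of the
-- smallest tier (objective: alternative decomposition, same result).

-- shared primitive helpers (dict get with default, `target or {...}`, normalization)
def pvGetD (d : List (String × String)) (k dflt : String) : String :=
  match d.find? (fun p => p.1 == k) with
  | some p => p.2
  | none => dflt

def pvDefaultTarget : List (String × String) :=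
  [("object_type", "none"), ("color", "none"), ("location_hint", "unknown")]

def pvResolve (target : Option (List (String × String))) : List (String × String) :=
  match target with
  | none => pvDefaultTarget
  | some d => if d.isEmpty then pvDefaultTarget else d

def pvNorm (a : String) : String := PySem.Str.strip (PySem.Str.lower a)

-- ===== PORT A =====
def aMatches (action : String) (target : List (String × String)) : Bool :=
  let normalized := PySem.Str.lower action
  let objectType := pvGetD target "object_type" "none"
  let color := pvGetD target "color" "none"
  if objectType != "none" && !(PySem.Str.isIn objectType normalized) then false
  else if color != "none" && !(PySem.Str.isIn color normalized) then false
  else true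

def aChoose (p : String → Bool) : List String → Int → Option Int
  | [], _ => none
  | x :: xs, i => if p x then some i else aChoose p xs (i + 1)

-- the `preferred_matches` dict: membership + lookup as one chain
def aPreferred (hint : String) (tgt : List (String × String)) : Option (String → Bool) :=
  if hint == "turn_left" then some (fun a => a == "turn left")
  else if hint == "turn_right" then some (fun a => a == "turn right")
  else if hint == "move_forward" then some (fun a => a == "move forward")
  else if hint == "pickup" then
    some (fun a => (PySem.Str.isIn "pick up" a || PySem.Str.startswith a "pickup ") && aMatches a tgt)
  else if hint == "toggle" then
    some (fun a => PySem.Str.isIn "toggle" a && aMatches a tgt)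
  else if hint == "drop" then some (fun a => a == "drop")
  else if hint == "done" then some (fun a => a == "check available actions")
  else none

def match_action_hint_to_index_py (action_hint : String) (legal_actions : List String) (target : Option (List (String × String))) : Option Int :=
  let tgt := pvResolve target
  let na := legal_actions.map pvNorm
  match (match aPreferred action_hint tgt with
         | some p => aChoose p na 0
         | none => none) with
  | some m => some m
  | none =>
    match (if action_hint == "move_forward" || action_hint == "pickup" || action_hint == "toggle"
           then aChoose (fun a => PySem.Str.startswith a "go to " && aMatches a tgt) na 0
           else none) with
    | some m => some m
    | none =>
      match (if pvGetD tgt "object_type" "none" != "none"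
             then aChoose (fun a => aMatches a tgt) na 0
             else none) with
      | some m => some m
      | none =>
        match aChoose (fun a => a != "check available actions") na 0 with
        | some m => some m
        | none => if legal_actions.isEmpty then none else some 0

-- ===== PORT B =====
def bMatches (action objectType color : String) : Bool :=
  let n := PySem.Str.lower action
  (objectType == "none" || PySem.Str.isIn objectType n)
    && (color == "none" || PySem.Str.isIn color n)

def bPreferred (hint action objectType color : String) : Bool :=
  if hint == "turn_left" then action == "turn left"
  else if hint == "turn_right" then action == "turn right"
  else if hint == "move_forward" then action == "move forward"
  else if hint == "pickup" then
    (PySem.Str.isIn "pick up" action || PySem.Str.startswith action "pickup ") && bMatches action objectType color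
  else if hint == "toggle" then
    PySem.Str.isIn "toggle" action && bMatches action objectType color
  else if hint == "drop" then action == "drop"
  else if hint == "done" then action == "check available actions"
  else false

def bTier (hint : String) (hinted goGate : Bool) (objectType color : String) (action : String) : Option Nat :=
  if hinted && bPreferred hint action objectType color then some 0
  else if goGate && (PySem.Str.startswith action "go to " && bMatches action objectType color) then some 1
  else if objectType != "none" && bMatches action objectType color then some 2
  else if action != "check available actions" then some 3
  else none

def bScan (tier : String → Option Nat) : List String → Int → Option (Nat × Int) → Option (Nat × Int)
  | [], _, best => best
  | raw :: xs, i, best =>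
    let nb := match tier (pvNorm raw), best with
      | none, b => b
      | some k, none => some (k, i)
      | some k, some (bk, bi) => if k < bk then some (k, i) else some (bk, bi)
    bScan tier xs (i + 1) nb

def match_action_hint_to_index_py_alt (action_hint : String) (legal_actions : List String) (target : Option (List (String × String))) : Option Int :=
  let tgt := pvResolve target
  let objectType := pvGetD tgt "object_type" "none"
  let color := pvGetD tgt "color" "none"
  let hinted := ["turn_left", "turn_right", "move_forward", "pickup", "toggle", "drop", "done"].contains action_hint
  let goGate := ["move_forward", "pickup", "toggle"].contains action_hint
  match bScan (bTier action_hint hinted goGate objectType color) legal_actions 0 none with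
  | some (_, i) => some i
  | none => if legal_actions.isEmpty then none else some 0

-- ===== PRECONDITION & SPEC =====
def Spec_match_action_hint_to_index_py (action_hint : String) (legal_actions : List String) (target : Option (List (String × String))) (out : Option Int) : Prop := out = match_action_hint_to_index_py_alt action_hint legal_actions target
instance (action_hint : String) (legal_actions : List String) (target : Option (List (String × String))) (out : Option Int) : Decidable (Spec_match_action_hint_to_index_py action_hint legal_actions target out) := by unfold Spec_match_action_hint_to_index_py; infer_instance

-- ===== CLAIM (what is proved, stated in full; the proofs are below) =====
def Claim_equal_match_action_hint_to_index_py : Prop := ∀ (action_hint : String) (legal_actions : List String) (target : Option (List (String × String))), Dom_match_action_hint_to_index_py action_hint legal_actions target → Spec_match_action_hint_to_index_py action_hint legal_actions target (match_action_hint_to_index_py action_hint legal_actions target)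

-- ===== LEMMAS AND PROOFS =====

-- generic "sequence of first-match scans" (A's shape) and generic tier scan (B's shape)
def seqChoose : List (String → Bool) → List String → Option Int
  | [], _ => none
  | p :: ps, xs =>
    match aChoose p xs 0 with
    | some i => some i
    | none => seqChoose ps xs

def gTier : List (String → Bool) → String → Option Nat
  | [], _ => none
  | p :: ps, a => if p a then some 0 else (gTier ps a).map (· + 1)

def gScan (t : String → Option Nat) : List String → Int → Option (Nat × Int) → Option (Nat × Int)
  | [], _, best => best
  | x :: xs, i, best =>
    gScan t xs (i + 1)
      (match t x, best with
       | none, b => b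
       | some k, none => some (k, i)
       | some k, some (bk, bi) => if k < bk then some (k, i) else some (bk, bi))

theorem bScan_eq_gScan (t : String → Option Nat) (xs : List String) (i : Int) (b : Option (Nat × Int)) :
    bScan t xs i b = gScan t (xs.map pvNorm) i b := by
  induction xs generalizing i b with
  | nil => rfl
  | cons x xs ih => simp [bScan, gScan, ih]

theorem gScan_congr (t t' : String → Option Nat) (h : ∀ a, t a = t' a) (xs : List String) (i : Int) (b : Option (Nat × Int)) :
    gScan t xs i b = gScan t' xs i b := by
  induction xs generalizing i b with
  | nil => rfl
  | cons x xs ih => simp only [gScan, h]; exact ih _ _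

theorem aChoose_congr (p q : String → Bool) (h : ∀ a, p a = q a) (xs : List String) (i : Int) :
    aChoose p xs i = aChoose q xs i := by
  induction xs generalizing i with
  | nil => rfl
  | cons x xs ih => simp only [aChoose, h]; split <;> simp [ih]

theorem aChoose_eq_none (p : String → Bool) (xs : List String) (i : Int) :
    aChoose p xs i = none ↔ ∀ x ∈ xs, p x = false := by
  induction xs generalizing i with
  | nil => simp [aChoose]
  | cons x xs ih =>
    simp only [aChoose]
    by_cases h : p x <;> simp [h, ih]

theorem gScan_none (t : String → Option Nat) (ht : ∀ x, t x = none) (xs : List String) (i : Int) (b : Option (Nat × Int)) :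
    gScan t xs i b = b := by
  induction xs generalizing i b with
  | nil => rfl
  | cons x xs ih => simp only [gScan, ht]; exact ih _ _

theorem gScan_cons_none (t : String → Option Nat) (x : String) (xs : List String) (i : Int) (b : Option (Nat × Int)) (ht : t x = none) :
    gScan t (x :: xs) i b = gScan t xs (i + 1) b := by
  cases b <;> simp [gScan, ht]

theorem gScan_cons_some_none (t : String → Option Nat) (x : String) (xs : List String) (i : Int) (k : Nat) (ht : t x = some k) :
    gScan t (x :: xs) i none = gScan t xs (i + 1) (some (k, i)) := by
  simp [gScan, ht]

theorem gScan_cons_some_some (t : String → Option Nat) (x : String) (xs : List String) (i : Int) (k bk : Nat) (bi : Int) (ht : t x = some k) :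
    gScan t (x :: xs) i (some (bk, bi)) = gScan t xs (i + 1) (if k < bk then some (k, i) else some (bk, bi)) := by
  simp [gScan, ht]

theorem gScan_zero (t : String → Option Nat) (xs : List String) (i j : Int) :
    gScan t xs i (some (0, j)) = some (0, j) := by
  induction xs generalizing i with
  | nil => rfl
  | cons x xs ih =>
    cases ht : t x with
    | none => rw [gScan_cons_none t x xs i _ ht]; exact ih _
    | some k =>
      rw [gScan_cons_some_some t x xs i k 0 j ht]
      simp only [Nat.not_lt_zero, if_false]
      exact ih _

theorem gScan_hit (p : String → Bool) (rest : List (String → Bool)) (xs : List String) :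
    ∀ (i r : Int) (b : Option (Nat × Int)), (∀ bk bi, b = some (bk, bi) → 1 ≤ bk) →
    aChoose p xs i = some r →
    gScan (gTier (p :: rest)) xs i b = some (0, r) := by
  induction xs with
  | nil => intro i r b _ h; simp [aChoose] at h
  | cons x xs ih =>
    intro i r b hb h
    rw [aChoose] at h
    by_cases hp : p x
    · rw [if_pos hp] at h
      obtain rfl : i = r := Option.some.inj h
      have htier : gTier (p :: rest) x = some 0 := by simp [gTier, hp]
      cases b with
      | none => rw [gScan_cons_some_none _ x xs i 0 htier]; exact gScan_zero _ _ _ _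
      | some q =>
        obtain ⟨bk, bi⟩ := q
        have h1 : 0 < bk := hb bk bi rfl
        rw [gScan_cons_some_some _ x xs i 0 bk bi htier, if_pos h1]
        exact gScan_zero _ _ _ _
    · rw [if_neg hp] at h
      cases ht : gTier rest x with
      | none =>
        have htier : gTier (p :: rest) x = none := by simp [gTier, hp, ht]
        rw [gScan_cons_none _ x xs i b htier]
        exact ih _ _ b hb h
      | some k =>
        have htier : gTier (p :: rest) x = some (k + 1) := by simp [gTier, hp, ht]
        cases b with
        | none =>
          rw [gScan_cons_some_none _ x xs i (k + 1) htier]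
          exact ih _ _ _ (by intro bk bi hq; simp at hq; omega) h
        | some q =>
          obtain ⟨bk, bi⟩ := q
          rw [gScan_cons_some_some _ x xs i (k + 1) bk bi htier]
          by_cases hk : k + 1 < bk
          · rw [if_pos hk]
            exact ih _ _ _ (by intro bk' bi' hq; simp at hq; omega) h
          · rw [if_neg hk]
            exact ih _ _ _ (by intro bk' bi' hq; simp at hq; have := hb bk bi rfl; omega) h

theorem gScan_shift (p : String → Bool) (rest : List (String → Bool)) (xs : List String)
    (hxs : ∀ x ∈ xs, p x = false) :
    ∀ (i : Int) (b : Option (Nat × Int)),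
    gScan (gTier (p :: rest)) xs i (b.map (fun q => (q.1 + 1, q.2))) =
      (gScan (gTier rest) xs i b).map (fun q => (q.1 + 1, q.2)) := by
  induction xs with
  | nil => intro i b; rfl
  | cons x xs ih =>
    intro i b
    have hx : p x = false := hxs x (by simp)
    have hxs' : ∀ x ∈ xs, p x = false := fun y hy => hxs y (by simp [hy])
    cases ht : gTier rest x with
    | none =>
      have htier : gTier (p :: rest) x = none := by simp [gTier, hx, ht]
      rw [gScan_cons_none _ x xs i _ htier, gScan_cons_none _ x xs i b ht]
      exact ih hxs' _ b
    | some k =>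
      have htier : gTier (p :: rest) x = some (k + 1) := by simp [gTier, hx, ht]
      cases b with
      | none =>
        rw [Option.map_none, gScan_cons_some_none _ x xs i (k + 1) htier,
            gScan_cons_some_none _ x xs i k ht]
        exact ih hxs' _ (some (k, i))
      | some q =>
        obtain ⟨bk, bi⟩ := q
        rw [Option.map_some, gScan_cons_some_some _ x xs i (k + 1) (bk + 1) bi htier,
            gScan_cons_some_some _ x xs i k bk bi ht]
        by_cases hk : k < bk
        · rw [if_pos hk, if_pos (by omega : k + 1 < bk + 1)]
          exact ih hxs' _ (some (k, i))
        · rw [if_neg hk, if_neg (by omega : ¬ k + 1 < bk + 1)]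
          exact ih hxs' _ (some (bk, bi))

theorem seq_eq_scan (ps : List (String → Bool)) (xs : List String) :
    seqChoose ps xs = (gScan (gTier ps) xs 0 none).map (fun q => q.2) := by
  induction ps with
  | nil => simp [seqChoose, gScan_none (gTier []) (fun _ => rfl)]
  | cons p rest ih =>
    simp only [seqChoose]
    cases h : aChoose p xs 0 with
    | some r =>
      rw [gScan_hit p rest xs 0 r none (by intro bk bi hq; cases hq) h]
      rfl
    | none =>
      have hxs := (aChoose_eq_none p xs 0).mp h
      have := gScan_shift p rest xs hxs 0 none
      simp only [Option.map_none] at this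
      rw [this, ih, Option.map_map]
      rfl

-- A's per-action predicate equals B's
theorem aMatches_eq (a : String) (tgt : List (String × String)) :
    aMatches a tgt = bMatches a (pvGetD tgt "object_type" "none") (pvGetD tgt "color" "none") := by
  simp only [aMatches, bMatches]
  cases h1 : (pvGetD tgt "object_type" "none" == "none") <;>
    cases h2 : (pvGetD tgt "color" "none" == "none") <;>
    cases h3 : PySem.Str.isIn (pvGetD tgt "object_type" "none") (PySem.Str.lower a) <;>
    cases h4 : PySem.Str.isIn (pvGetD tgt "color" "none") (PySem.Str.lower a) <;>
    simp [h1, h2, bne]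

-- B's tier function is the generic tier of B's four gated predicates
theorem bTier_eq_gTier (hint : String) (hinted goGate : Bool) (ot col : String) (a : String) :
    bTier hint hinted goGate ot col a =
      gTier [fun a => hinted && bPreferred hint a ot col,
             fun a => goGate && (PySem.Str.startswith a "go to " && bMatches a ot col),
             fun a => ot != "none" && bMatches a ot col,
             fun a => a != "check available actions"] a := by
  simp only [bTier, gTier]
  split_ifs <;> simp_all

theorem aChoose_of_false (p : String → Bool) (hp : ∀ a, p a = false) (na : List String) :
    aChoose p na 0 = none := (aChoose_eq_none p na 0).mpr (fun x _ => hp x)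

-- A's first pass (preferred-match lookup) equals one scan with B's gated tier-0 predicate
theorem step1_eq (hint : String) (tgt : List (String × String)) (na : List String) :
    (match aPreferred hint tgt with
     | some p => aChoose p na 0
     | none => none) =
    aChoose (fun a => (["turn_left", "turn_right", "move_forward", "pickup", "toggle", "drop", "done"].contains hint)
                      && bPreferred hint a (pvGetD tgt "object_type" "none") (pvGetD tgt "color" "none")) na 0 := by
  by_cases h1 : hint = "turn_left"
  · subst h1; simp only [aPreferred]; norm_num
    exact aChoose_congr _ _ (fun a => by simp [bPreferred]) na 0
  · by_cases h2 : hint = "turn_right"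
    · subst h2; simp only [aPreferred]; norm_num
      exact aChoose_congr _ _ (fun a => by simp [bPreferred]) na 0
    · by_cases h3 : hint = "move_forward"
      · subst h3; simp only [aPreferred]; norm_num
        exact aChoose_congr _ _ (fun a => by simp [bPreferred]) na 0
      · by_cases h4 : hint = "pickup"
        · subst h4; simp only [aPreferred]; norm_num
          exact aChoose_congr _ _ (fun a => by simp [bPreferred, aMatches_eq]) na 0
        · by_cases h5 : hint = "toggle"
          · subst h5; simp only [aPreferred]; norm_num
            exact aChoose_congr _ _ (fun a => by simp [bPreferred, aMatches_eq]) na 0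
          · by_cases h6 : hint = "drop"
            · subst h6; simp only [aPreferred]; norm_num
              exact aChoose_congr _ _ (fun a => by simp [bPreferred]) na 0
            · by_cases h7 : hint = "done"
              · subst h7; simp only [aPreferred]; norm_num
                exact aChoose_congr _ _ (fun a => by simp [bPreferred]) na 0
              · simp only [aPreferred]
                norm_num [h1, h2, h3, h4, h5, h6, h7]
                exact (aChoose_of_false _ (fun a => by simp) na).symm

-- A's targeted go-to pass equals one scan with B's gated tier-1 predicate
theorem step2_eq (hint : String) (tgt : List (String × String)) (na : List String) :
    (if hint == "move_forward" || hint == "pickup" || hint == "toggle"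
     then aChoose (fun a => PySem.Str.startswith a "go to " && aMatches a tgt) na 0
     else none) =
    aChoose (fun a => (["move_forward", "pickup", "toggle"].contains hint)
                      && (PySem.Str.startswith a "go to "
                          && bMatches a (pvGetD tgt "object_type" "none") (pvGetD tgt "color" "none"))) na 0 := by
  by_cases g1 : hint = "move_forward"
  · subst g1; norm_num
    exact aChoose_congr _ _ (fun a => by simp [aMatches_eq]) na 0
  · by_cases g2 : hint = "pickup"
    · subst g2; norm_num
      exact aChoose_congr _ _ (fun a => by simp [aMatches_eq]) na 0
    · by_cases g3 : hint = "toggle"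
      · subst g3; norm_num
        exact aChoose_congr _ _ (fun a => by simp [aMatches_eq]) na 0
      · norm_num [g1, g2, g3]
        exact (aChoose_of_false _ (fun a => by simp) na).symm

-- A's any-target pass equals one scan with B's gated tier-2 predicate
theorem step3_eq (tgt : List (String × String)) (na : List String) :
    (if pvGetD tgt "object_type" "none" != "none"
     then aChoose (fun a => aMatches a tgt) na 0
     else none) =
    aChoose (fun a => (pvGetD tgt "object_type" "none" != "none")
                      && bMatches a (pvGetD tgt "object_type" "none") (pvGetD tgt "color" "none")) na 0 := by
  by_cases hg : (pvGetD tgt "object_type" "none" != "none") = true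
  · simp only [hg, if_true]
    exact aChoose_congr _ _ (fun a => by simp [aMatches_eq]) na 0
  · simp only [hg, Bool.false_eq_true, if_false]
    exact (aChoose_of_false _ (fun a => by simp at hg; simp [hg]) na).symm

theorem opt_flatten (o r fb : Option Int) :
    (match (match o with | some i => some i | none => r) with | some m => some m | none => fb)
      = (match o with | some m => some m | none => match r with | some m => some m | none => fb) := by
  cases o <;> rfl

theorem assemble (ps : List (String → Bool)) (xs : List String) (fb : Option Int) :
    (match seqChoose ps xs with | some m => some m | none => fb) =
    (match gScan (gTier ps) xs 0 none with | some (_, i) => some i | none => fb) := by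
  rw [seq_eq_scan]
  cases gScan (gTier ps) xs 0 none <;> rfl

-- ===== VERDICT (by name: the statement is the Claim_ definition above) =====
theorem match_action_hint_to_index_py_spec : Claim_equal_match_action_hint_to_index_py := by
  intro hint la target _
  unfold Spec_match_action_hint_to_index_py
  simp only [match_action_hint_to_index_py, match_action_hint_to_index_py_alt]
  rw [step1_eq, step2_eq, step3_eq]
  rw [bScan_eq_gScan,
      gScan_congr _ _ (bTier_eq_gTier hint
        (["turn_left", "turn_right", "move_forward", "pickup", "toggle", "drop", "done"].contains hint)
        (["move_forward", "pickup", "toggle"].contains hint)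
        (pvGetD (pvResolve target) "object_type" "none") (pvGetD (pvResolve target) "color" "none")),
      ← assemble]
  simp only [seqChoose, opt_flatten]
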